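-- pv_equiv track=rewrite | github.com/LukeCHC/sqc-dash | GNSS/sys_names.py | prn2sys_num
-- ===== SOURCE A (Python) =====
-- def prn2sys_num(prn, gpsst=32, glost=27, galst=36, qzsst=7, bdsst=64):
--     """
--     Convert PRN to system number and satellite number within that system.
--
--     Args:
--     - prn (int): The PRN number to convert.
--     - gpsst (int, optional): Total satellites for GPS. Defaults to 32.
--     - glost (int, optional): Total satellites for GLONASS. Defaults to 27.
--     - galst (int, optional): Total satellites for Galileo. Defaults to 36.
--     - qzsst (int, optional): Total satellites for QZSS. Defaults to 7.
--     - bdsst (int, optional): Total satellites for BDS. Defaults to 64.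
--
--     Returns:
--     - tuple: A tuple containing the system number (1-5) and the satellite number within that system.
--
--     Raises:
--     - Exception: If the PRN is outside the valid range.
--     """
--     # Ensure PRN is positive
--     if prn <= 0:
--         raise ValueError("PRN too low")
--
--     # Satellite system identifiers and their total satellites
--     systems = [(1, gpsst), (2, glost), (3, galst), (4, qzsst), (5, bdsst)]
--     cumsum = 0  # Cumulative sum of satellites across systems
--
--     for sys_id, total_sats in systems:
--         if prn <= cumsum + total_sats:
--             return sys_id, prn - cumsum
--         cumsum += total_sats
--
--     raise ValueError("PRN too high")
-- ===== SOURCE B (Python) =====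
-- from bisect import bisect_left
-- from itertools import accumulate
--
--
-- def prn2sys_num(prn, gpsst=32, glost=27, galst=36, qzsst=7, bdsst=64):
--     if prn <= 0:
--         raise ValueError("PRN too low")
--     prefix = list(accumulate((0, gpsst, glost, galst, qzsst, bdsst)))
--     pos = bisect_left(prefix, prn, 1)
--     if pos == len(prefix):
--         raise ValueError("PRN too high")
--     return pos, prn - prefix[pos - 1]
-- ===== Notes on version B (the rewrite author's own statement) =====
-- stated objective: alternative
-- what changed: Replaced the accumulating linear scan over (system,total) pairs with a precomputed cumulative-prefix table searched by bisect_left (binary search), returning (pos, prn - prefix[pos-1]).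
-- outside the precondition, e.g. on prn2sys_num(12, 12, -19, 6, 11, 5): A returns (1, 12), B returns (5, 2); on prn2sys_num(12, 12, -1, -4, -16, 4): A returns (1, 12), B raises ValueError
import Mathlib
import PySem

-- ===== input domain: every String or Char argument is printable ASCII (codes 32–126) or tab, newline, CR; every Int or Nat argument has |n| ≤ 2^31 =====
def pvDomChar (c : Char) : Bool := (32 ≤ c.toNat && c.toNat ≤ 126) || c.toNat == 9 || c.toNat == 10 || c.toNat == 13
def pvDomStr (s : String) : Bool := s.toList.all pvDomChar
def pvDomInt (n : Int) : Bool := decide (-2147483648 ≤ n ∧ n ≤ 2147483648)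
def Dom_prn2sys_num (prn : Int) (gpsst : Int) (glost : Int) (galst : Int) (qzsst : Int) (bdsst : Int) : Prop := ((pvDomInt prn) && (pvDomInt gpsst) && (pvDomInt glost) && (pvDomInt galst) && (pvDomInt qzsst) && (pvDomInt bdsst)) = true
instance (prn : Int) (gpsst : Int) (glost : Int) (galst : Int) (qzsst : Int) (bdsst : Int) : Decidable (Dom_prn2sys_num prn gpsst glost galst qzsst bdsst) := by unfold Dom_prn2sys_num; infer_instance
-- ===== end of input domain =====

-- B replaces A's accumulating linear scan with a cumulative-prefix table plus binary search (bisect_left); alternative decomposition, not faster at n=5.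
-- ===== PORT A =====
-- loop body of A's 'for sys_id, total_sats in systems' with accumulator cumsum; (0,0) marks the "PRN too high" raise (outside Pre_)
def pyLoopA (prn : Int) : List (Int × Int) → Int → Int × Int
  | [], _ => (0, 0)
  | (sysId, totalSats) :: rest, cumsum =>
    if prn ≤ cumsum + totalSats then (sysId, prn - cumsum)
    else pyLoopA prn rest (cumsum + totalSats)

def prn2sys_num (prn : Int) (gpsst : Int) (glost : Int) (galst : Int) (qzsst : Int) (bdsst : Int) : Int × Int :=
  if prn ≤ 0 then (0, 0)  -- ValueError "PRN too low" (outside Pre_)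
  else pyLoopA prn [(1, gpsst), (2, glost), (3, galst), (4, qzsst), (5, bdsst)] 0

-- ===== PORT B =====
-- hand port of bisect.bisect_left(a, x, lo) on a list of Int with hi = len(a); exact for in-range indices
def bisectLeft (a : List Int) (x : Int) (lo hi : Nat) : Nat :=
  if lo < hi then
    let mid := (lo + hi) / 2
    if a.getD mid 0 < x then bisectLeft a x (mid + 1) hi
    else bisectLeft a x lo mid
  else lo
termination_by hi - lo
decreasing_by all_goals omega

def prn2sys_num_alt (prn : Int) (gpsst : Int) (glost : Int) (galst : Int) (qzsst : Int) (bdsst : Int) : Int × Int :=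
  if prn ≤ 0 then (0, 0)  -- ValueError "PRN too low" (outside Pre_)
  else
    -- prefix = list(accumulate((0, gpsst, glost, galst, qzsst, bdsst)))
    let pfx : List Int := [0, gpsst, gpsst + glost, gpsst + glost + galst,
                              gpsst + glost + galst + qzsst, gpsst + glost + galst + qzsst + bdsst]
    let pos := bisectLeft pfx prn 1 pfx.length
    if pos = pfx.length then (0, 0)  -- ValueError "PRN too high" (outside Pre_)
    else ((pos : Int), prn - pfx.getD (pos - 1) 0)

-- ===== PRECONDITION & SPEC =====
-- Pre_ excludes the inputs on which A raises ValueError (prn <= 0 or prn above the grand total) and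
-- restricts to the natural domain of nonnegative satellite totals: on negative totals A still returns
-- a value picked by its scan order, where B's binary search may raise or answer differently.
def Pre_prn2sys_num (prn : Int) (gpsst : Int) (glost : Int) (galst : Int) (qzsst : Int) (bdsst : Int) : Prop :=
  1 ≤ prn ∧ 0 ≤ gpsst ∧ 0 ≤ glost ∧ 0 ≤ galst ∧ 0 ≤ qzsst ∧ 0 ≤ bdsst ∧
  prn ≤ gpsst + glost + galst + qzsst + bdsst
instance (prn : Int) (gpsst : Int) (glost : Int) (galst : Int) (qzsst : Int) (bdsst : Int) : Decidable (Pre_prn2sys_num prn gpsst glost galst qzsst bdsst) := by unfold Pre_prn2sys_num; infer_instance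

def pvWitness_prn2sys_num : Int × Int × Int × Int × Int × Int := (40, 32, 27, 36, 7, 64)

def Spec_prn2sys_num (prn : Int) (gpsst : Int) (glost : Int) (galst : Int) (qzsst : Int) (bdsst : Int) (out : Int × Int) : Prop := out = prn2sys_num_alt prn gpsst glost galst qzsst bdsst
instance (prn : Int) (gpsst : Int) (glost : Int) (galst : Int) (qzsst : Int) (bdsst : Int) (out : Int × Int) : Decidable (Spec_prn2sys_num prn gpsst glost galst qzsst bdsst out) := by unfold Spec_prn2sys_num; infer_instance

-- ===== CLAIM (what is proved, stated in full; the proofs are below) =====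
def Claim_equal_prn2sys_num : Prop := ∀ (prn : Int) (gpsst : Int) (glost : Int) (galst : Int) (qzsst : Int) (bdsst : Int), Dom_prn2sys_num prn gpsst glost galst qzsst bdsst → Pre_prn2sys_num prn gpsst glost galst qzsst bdsst → Spec_prn2sys_num prn gpsst glost galst qzsst bdsst (prn2sys_num prn gpsst glost galst qzsst bdsst)

-- ===== LEMMAS AND PROOFS =====

-- ===== VERDICT (by name: the statement is the Claim_ definition above) =====
theorem prn2sys_num_spec : Claim_equal_prn2sys_num := by
  intro prn g l ga q b _ hpre
  obtain ⟨h1, h2, h3, h4, h5, h6, h7⟩ := hpre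
  unfold Spec_prn2sys_num prn2sys_num prn2sys_num_alt
  simp [pyLoopA, bisectLeft]
  split_ifs <;> simp_all <;> omega
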